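-- pv_equiv track=rewrite | github.com/IshootLaser/Gemma-NameCraft | apis/routes/chat_completion.py | find_argmax
-- ===== SOURCE A (Python) =====
-- def find_argmax(_list):
--     _min = min(_list)
--     argmax = 0
--     for n, i in enumerate(_list):
--         if i >= _min:
--             argmax = n
--             _min = i
--     return argmax
-- ===== SOURCE B (Python) =====
-- def find_argmax(_list):
--     m = max(_list)
--     return len(_list) - 1 - _list[::-1].index(m)
-- ===== Notes on version B (the rewrite author's own statement) =====
-- stated objective: simpler
-- what changed: A fuses a running-max and running-argmax into one stateful loop seeded with min(_list); B decomposes the task into two library passes: compute the maximum, then locate its last occurrence via the reversed list's .index. Pre_ excludes only the empty list, on which both A (min) and B (max) raise ValueError.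
-- outside the precondition, e.g. on find_argmax([]): A raises ValueError, B raises ValueError
import Mathlib
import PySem

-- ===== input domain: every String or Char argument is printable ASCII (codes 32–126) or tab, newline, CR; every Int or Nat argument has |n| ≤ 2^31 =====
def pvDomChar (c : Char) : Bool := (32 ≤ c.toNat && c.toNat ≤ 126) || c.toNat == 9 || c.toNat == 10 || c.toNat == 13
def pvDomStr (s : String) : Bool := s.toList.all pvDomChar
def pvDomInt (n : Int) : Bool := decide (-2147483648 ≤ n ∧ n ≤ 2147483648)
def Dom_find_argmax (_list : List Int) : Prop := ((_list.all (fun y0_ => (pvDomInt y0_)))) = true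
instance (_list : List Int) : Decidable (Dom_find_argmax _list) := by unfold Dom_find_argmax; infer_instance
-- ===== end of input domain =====

-- B replaces A's fused running-max/running-argmax loop (seeded with min(_list)) by two library
-- passes — compute max(_list), then locate its last occurrence via the reversed list's .index —
-- for simplicity; same O(n) cost.

-- ===== PORT A =====
-- A's loop body: state (_min, argmax); 'if i >= _min: argmax = n; _min = i'
def pvStepA (st : Int × Int) (p : Int × Int) : Int × Int :=
  if st.1 ≤ p.2 then (p.2, p.1) else st

def find_argmax (_list : List Int) : Int :=
  match PySem.List.min? _list (fun y => y) with
  | none => 0   -- unreachable: Pre_ excludes [], where Python's min([]) raises ValueError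
  | some m0 =>
    let st := (PySem.List.enumerate _list 0).foldl pvStepA (m0, 0)
    st.2

-- ===== PORT B =====
def find_argmax_alt (_list : List Int) : Int :=
  match PySem.List.max? _list (fun y => y) with
  | none => 0   -- unreachable: Pre_ excludes [], where Python's max([]) raises ValueError
  | some m =>
    match PySem.List.slice? _list none none (-1) with
    | none => 0   -- unreachable: step -1 ≠ 0
    | some rev =>
      match PySem.List.index? rev m with
      | none => 0   -- unreachable: the max is a member of the reversed list
      | some k => PySem.List.len _list - 1 - (k : Int)

-- ===== PRECONDITION & SPEC =====
-- Pre_ excludes only the empty list, on which both A (min([])) and B (max([])) raise ValueError.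
def Pre_find_argmax (_list : List Int) : Prop := _list ≠ []
instance (_list : List Int) : Decidable (Pre_find_argmax _list) := by unfold Pre_find_argmax; infer_instance
def pvWitness_find_argmax : List Int := [3, 7, 7, 1]

def Spec_find_argmax (_list : List Int) (out : Int) : Prop := out = find_argmax_alt _list
instance (_list : List Int) (out : Int) : Decidable (Spec_find_argmax _list out) := by unfold Spec_find_argmax; infer_instance

-- ===== CLAIM (what is proved, stated in full; the proofs are below) =====
def Claim_equal_find_argmax : Prop := ∀ (_list : List Int), Dom_find_argmax _list → Pre_find_argmax _list → Spec_find_argmax _list (find_argmax _list)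

-- ===== LEMMAS AND PROOFS =====

-- the maximum of a nonempty list, as A's running loop and B's max(_list) both compute it
def pvBigmax : List Int → Int
  | [] => 0
  | x :: t => t.foldl max x

-- the index A returns: last index attaining the maximum
def pvLastMaxIdx : List Int → Nat
  | [] => 0
  | [_] => 0
  | x :: y :: u => if x ≤ pvBigmax (y :: u) then pvLastMaxIdx (y :: u) + 1 else 0

theorem pvFoldl_max_comm (t : List Int) : ∀ x y : Int, t.foldl max (max x y) = max x (t.foldl max y) := by
  induction t with
  | nil => intro x y; rfl
  | cons z t ih =>
    intro x y
    simp only [List.foldl_cons]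
    rw [max_assoc, ih]

theorem pvBigmax_cons (x y : Int) (u : List Int) :
    pvBigmax (x :: y :: u) = max x (pvBigmax (y :: u)) := by
  simp only [pvBigmax, List.foldl_cons]
  rw [show max x y = max x y from rfl]
  exact pvFoldl_max_comm u x y

theorem pvLe_bigmax {y : Int} {l : List Int} (h : y ∈ l) : y ≤ pvBigmax l := by
  cases l with
  | nil => cases h
  | cons x t =>
    simp only [pvBigmax]
    rcases List.mem_cons.mp h with h | h
    · subst h; exact (PySem.List.le_foldl_max t y).1
    · exact (PySem.List.le_foldl_max t x).2 y h

theorem pvBigmax_mem {l : List Int} (h : l ≠ []) : pvBigmax l ∈ l := by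
  cases l with
  | nil => exact absurd rfl h
  | cons x t =>
    have := PySem.List.max?_mem (PySem.List.max?_id_cons x t)
    simpa [pvBigmax] using this

-- if every element is below the running value, the loop state never changes
theorem pvFold_none {t : List Int} (h : ∀ y ∈ t, y < c) :
    ∀ (a s : Int), (PySem.List.enumerate t s).foldl pvStepA (c, a) = (c, a) := by
  induction t with
  | nil => intro a s; rfl
  | cons z t ih =>
    intro a s
    rw [PySem.List.enumerate_cons, List.foldl_cons]
    have hz : ¬ (c ≤ z) := not_le.mpr (h z (List.mem_cons_self))
    simp only [pvStepA, if_neg hz]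
    exact ih (fun y hy => h y (List.mem_cons_of_mem z hy)) a (s + 1)

-- A's loop invariant: once the running value is ≤ some element, the loop computes
-- (maximum, start + last index of the maximum)
theorem pvFold_char : ∀ (t : List Int), t ≠ [] → ∀ (c a s : Int), (∃ y ∈ t, c ≤ y) →
    (PySem.List.enumerate t s).foldl pvStepA (c, a) = (pvBigmax t, s + (pvLastMaxIdx t : Int)) := by
  intro t
  induction t with
  | nil => intro h; exact absurd rfl h
  | cons x t ih =>
    intro _ c a s hc
    rw [PySem.List.enumerate_cons, List.foldl_cons]
    by_cases hx : c ≤ x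
    · simp only [pvStepA, if_pos hx]
      cases t with
      | nil => simp [pvBigmax, pvLastMaxIdx]
      | cons y u =>
        by_cases h2 : ∃ z ∈ y :: u, x ≤ z
        · rw [ih (by simp) x s (s + 1) h2]
          obtain ⟨z, hz, hxz⟩ := h2
          have hxb : x ≤ pvBigmax (y :: u) := le_trans hxz (pvLe_bigmax hz)
          rw [pvBigmax_cons, max_eq_right hxb]
          simp only [pvLastMaxIdx, if_pos hxb]
          congr 1
          push_cast; ring
        · push Not at h2
          rw [pvFold_none (fun z hz => h2 z hz) s (s + 1)]
          have hb : pvBigmax (y :: u) < x := h2 _ (pvBigmax_mem (by simp))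
          rw [pvBigmax_cons, max_eq_left hb.le]
          simp only [pvLastMaxIdx, if_neg (not_le.mpr hb)]
          simp
    · simp only [pvStepA, if_neg hx]
      obtain ⟨y, hy, hcy⟩ := hc
      have hyt : y ∈ t := by
        rcases List.mem_cons.mp hy with h | h
        · exact absurd (h ▸ hcy) hx
        · exact h
      have ht : t ≠ [] := by intro h; rw [h] at hyt; cases hyt
      rw [ih ht c a (s + 1) ⟨y, hyt, hcy⟩]
      have hxb : x ≤ pvBigmax t := le_trans (not_le.mp hx).le (le_trans hcy (pvLe_bigmax hyt))
      cases t with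
      | nil => exact absurd rfl ht
      | cons z u =>
        rw [pvBigmax_cons, max_eq_right hxb]
        simp only [pvLastMaxIdx, if_pos hxb]
        congr 1
        push_cast; ring

-- B computes the same index, via reverse + first index of the maximum
theorem pvAlt_char : ∀ (l : List Int), l ≠ [] → find_argmax_alt l = (pvLastMaxIdx l : Int) := by
  intro l hl
  cases l with
  | nil => exact absurd rfl hl
  | cons x t =>
    unfold find_argmax_alt
    rw [PySem.List.max?_id_cons, PySem.List.slice?_none_none_neg_one]
    simp only
    -- index of the max in the reversed list
    have key : ∀ (l : List Int), l ≠ [] →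
        PySem.List.index? l.reverse (pvBigmax l) = some (l.length - 1 - pvLastMaxIdx l) ∧
        pvLastMaxIdx l ≤ l.length - 1 := by
      intro l hl
      induction l with
      | nil => exact absurd rfl hl
      | cons x t ih =>
        cases t with
        | nil =>
          simp [pvBigmax, pvLastMaxIdx, PySem.List.index?_eq_idxOf?, List.idxOf?]
        | cons y u =>
          obtain ⟨ih1, ih2⟩ := ih (by simp)
          by_cases hxb : x ≤ pvBigmax (y :: u)
          · have hmem : pvBigmax (x :: y :: u) ∈ (y :: u).reverse := by
              rw [pvBigmax_cons, max_eq_right hxb]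
              exact List.mem_reverse.mpr (pvBigmax_mem (by simp))
            constructor
            · rw [List.reverse_cons, PySem.List.index?_append_of_mem _ hmem,
                  pvBigmax_cons, max_eq_right hxb, ih1]
              simp only [pvLastMaxIdx, if_pos hxb]
              congr 1
              have : pvLastMaxIdx (y :: u) ≤ (y :: u).length - 1 := ih2
              simp only [List.length_cons] at *
              omega
            · simp only [pvLastMaxIdx, if_pos hxb, List.length_cons]
              have := ih2; simp only [List.length_cons] at this; omega
          · have hb : pvBigmax (y :: u) < x := not_le.mp hxb
            have hnot : x ∉ (y :: u).reverse := by
              rw [List.mem_reverse]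
              intro hmem
              exact absurd (pvLe_bigmax hmem) hxb
            constructor
            · rw [List.reverse_cons, pvBigmax_cons, max_eq_left hb.le,
                  PySem.List.index?_append_singleton_self _ _ hnot]
              simp only [pvLastMaxIdx, if_neg hxb, List.length_reverse]
              congr 1
            · simp [pvLastMaxIdx, if_neg hxb]
    obtain ⟨h1, h2⟩ := key (x :: t) hl
    simp only [pvBigmax] at h1 ⊢
    rw [h1]
    simp only [PySem.List.len_eq, List.length_cons]
    have hlen : (x :: t).length = t.length + 1 := by simp
    simp only [List.length_cons] at h2
    push_cast [Nat.cast_sub]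
    omega

-- min(_list) is ≤ the head, so A's first comparison always fires
theorem pvMin_le_head (x : Int) (t : List Int) : t.foldl min x ≤ x := by
  have := PySem.List.min?_isMin (PySem.List.min?_id_cons x t) x (List.mem_cons_self)
  exact this

-- ===== VERDICT (by name: the statement is the Claim_ definition above) =====
theorem find_argmax_spec : Claim_equal_find_argmax := by
  intro l _ hpre
  unfold Spec_find_argmax
  cases l with
  | nil => exact absurd rfl hpre
  | cons x t =>
    unfold find_argmax
    rw [PySem.List.min?_id_cons]
    simp only
    rw [pvFold_char (x :: t) (by simp) (t.foldl min x) 0 0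
        ⟨x, List.mem_cons_self, pvMin_le_head x t⟩]
    rw [pvAlt_char (x :: t) (by simp)]
    simp
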